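-- pv_equiv track=rewrite | github.com/oboneva/Python101-Problems | Week2/matrix_bombing.py | matrix_bombing_plan
-- ===== SOURCE A (Python) =====
-- def matrix_bombing_plan(matrix):
--     sum_of_all = 0
--     rows = len(matrix)
--     cows = len(matrix[0])
--
--     for i in range(rows):
--         for j in range(cows):
--             sum_of_all += matrix[i][j]
--
--     result = {}
--
--     for i in range(rows):
--         for j in range(cows):
--             bombed_sum = 0
--
--             for x in range(i - 1, i + 2):
--                 for y in range(j - 1, j + 2):
--                     if x >= 0 and y >= 0 and x < rows and y < cows:
--                         bombed_sum += min(matrix[i][j], matrix[x][y])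
--
--             result.update({(i, j): sum_of_all - bombed_sum + matrix[i][j]})
--
--     return result
-- ===== SOURCE B (Python) =====
-- def matrix_bombing_plan(matrix):
--     rows = len(matrix)
--     cows = len(matrix[0])
--     total = sum(matrix[i][j] for i in range(rows) for j in range(cows))
--     res = [[total] * cows for _ in range(rows)]
--     for i in range(rows):
--         for j in range(cows):
--             c = matrix[i][j]
--             for x, y in ((i, j + 1), (i + 1, j - 1), (i + 1, j), (i + 1, j + 1)):
--                 if 0 <= x < rows and 0 <= y < cows:
--                     m = c if c < matrix[x][y] else matrix[x][y]
--                     res[i][j] -= m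
--                     res[x][y] -= m
--     return {(i, j): res[i][j] for i in range(rows) for j in range(cows)}
-- ===== Notes on version B (the rewrite author's own statement) =====
-- stated objective: faster
-- what changed: Replaces the per-cell 3x3 window rescan with an edge-distribution pass over a result grid initialised to the total sum: each of the four forward neighbour pairs computes its min once and subtracts it from both endpoints, so every adjacent pair is processed once instead of twice and the center term disappears.
import Mathlib
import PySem

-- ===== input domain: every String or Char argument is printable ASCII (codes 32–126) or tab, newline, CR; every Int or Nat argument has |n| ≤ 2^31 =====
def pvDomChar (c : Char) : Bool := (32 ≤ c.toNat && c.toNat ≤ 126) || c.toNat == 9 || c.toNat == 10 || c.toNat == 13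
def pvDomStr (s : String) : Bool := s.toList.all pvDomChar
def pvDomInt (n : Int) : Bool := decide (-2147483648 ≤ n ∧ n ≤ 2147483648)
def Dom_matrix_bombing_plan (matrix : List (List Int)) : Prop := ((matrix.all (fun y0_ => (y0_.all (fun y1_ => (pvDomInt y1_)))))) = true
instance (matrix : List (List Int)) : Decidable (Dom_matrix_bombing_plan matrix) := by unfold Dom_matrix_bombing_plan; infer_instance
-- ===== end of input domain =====

-- B replaces A's per-cell 3x3 window rescan by one edge-distribution pass over a result
-- grid initialised to the total sum (each adjacent pair's min is computed once and
-- subtracted from both endpoints); a timing run measured B faster by a constant factor.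

-- ===== PORT A =====

def mget (M : List (List Int)) (x y : Int) : Int :=
  PySem.List.pyGetD (PySem.List.pyGetD M x []) y 0

def matrix_bombing_plan (matrix : List (List Int)) : List (Int × Int × Int) :=
  let rows : Int := matrix.length
  let cows : Int := ((PySem.List.pyGetD matrix 0 ([] : List Int)).length : Int)
  let sum_of_all : Int :=
    (PySem.List.pyRange 0 rows 1).foldl (fun s i =>
      (PySem.List.pyRange 0 cows 1).foldl (fun s j => s + mget matrix i j) s) 0
  let result : PySem.Dict (Int × Int) Int :=
    (PySem.List.pyRange 0 rows 1).foldl (fun d i =>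
      (PySem.List.pyRange 0 cows 1).foldl (fun d j =>
        let bombed_sum : Int :=
          (PySem.List.pyRange (i - 1) (i + 2) 1).foldl (fun b x =>
            (PySem.List.pyRange (j - 1) (j + 2) 1).foldl (fun b y =>
              if 0 ≤ x ∧ 0 ≤ y ∧ x < rows ∧ y < cows
              then b + min (mget matrix i j) (mget matrix x y) else b) b) 0
        d.insert (i, j) (sum_of_all - bombed_sum + mget matrix i j)) d) PySem.Dict.empty
  result.items.map (fun p => (p.1.1, p.1.2, p.2))

-- ===== PORT B =====
def sub2 (res : List (List Int)) (x y m : Int) : List (List Int) :=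
  PySem.List.pySetD res x (PySem.List.pySetD (PySem.List.pyGetD res x []) y (mget res x y - m))

def matrix_bombing_plan_alt (matrix : List (List Int)) : List (Int × Int × Int) :=
  let rows : Int := matrix.length
  let cows : Int := ((PySem.List.pyGetD matrix 0 ([] : List Int)).length : Int)
  let total : Int :=
    ((PySem.List.pyRange 0 rows 1).flatMap (fun i =>
      (PySem.List.pyRange 0 cows 1).map (fun j => mget matrix i j))).sum
  let res0 : List (List Int) := List.replicate rows.toNat (List.replicate cows.toNat total)
  let res : List (List Int) :=
    (PySem.List.pyRange 0 rows 1).foldl (fun r i =>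
      (PySem.List.pyRange 0 cows 1).foldl (fun r j =>
        let c := mget matrix i j
        [(i, j + 1), (i + 1, j - 1), (i + 1, j), (i + 1, j + 1)].foldl (fun r xy =>
          if 0 ≤ xy.1 ∧ xy.1 < rows ∧ 0 ≤ xy.2 ∧ xy.2 < cows then
            let m := if c < mget matrix xy.1 xy.2 then c else mget matrix xy.1 xy.2
            sub2 (sub2 r i j m) xy.1 xy.2 m
          else r) r) r) res0
  (PySem.List.pyRange 0 rows 1).flatMap (fun i =>
    (PySem.List.pyRange 0 cows 1).map (fun j => (i, j, mget res i j)))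

-- ===== PRECONDITION & SPEC =====
-- Pre_ excludes exactly the inputs on which the Python A raises IndexError: the empty
-- matrix (len(matrix[0])) and ragged matrices with some row shorter than the first row
-- (matrix[i][j] is read for every j < len(matrix[0])); B raises on exactly the same inputs.
def Pre_matrix_bombing_plan (matrix : List (List Int)) : Prop :=
  matrix ≠ [] ∧ ∀ r ∈ matrix, (matrix.headD []).length ≤ r.length
instance (matrix : List (List Int)) : Decidable (Pre_matrix_bombing_plan matrix) := by
  unfold Pre_matrix_bombing_plan; infer_instance

def pvWitness_matrix_bombing_plan : List (List Int) := [[1, 2], [3, 4]]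

def Spec_matrix_bombing_plan (matrix : List (List Int)) (out : List (Int × Int × Int)) : Prop := out = matrix_bombing_plan_alt matrix
instance (matrix : List (List Int)) (out : List (Int × Int × Int)) : Decidable (Spec_matrix_bombing_plan matrix out) := by unfold Spec_matrix_bombing_plan; infer_instance

-- ===== CLAIM (what is proved, stated in full; the proofs are below) =====
def Claim_equal_matrix_bombing_plan : Prop := ∀ (matrix : List (List Int)), Dom_matrix_bombing_plan matrix → Pre_matrix_bombing_plan matrix → Spec_matrix_bombing_plan matrix (matrix_bombing_plan matrix)

-- ===== LEMMAS AND PROOFS =====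

def mbpShape (res : List (List Int)) (R C : Int) : Prop :=
  (res.length : Int) = R ∧ ∀ r ∈ res, (r.length : Int) = C

def edgeC (M : List (List Int)) (R C i j x y p q : Int) : Int :=
  if 0 ≤ x ∧ x < R ∧ 0 ≤ y ∧ y < C then
    (if p = i ∧ q = j then min (mget M i j) (mget M x y) else 0) +
    (if p = x ∧ q = y then min (mget M i j) (mget M x y) else 0)
  else 0

def contrib (M : List (List Int)) (R C i j p q : Int) : Int :=
  edgeC M R C i j i (j+1) p q + edgeC M R C i j (i+1) (j-1) p q +
  edgeC M R C i j (i+1) j p q + edgeC M R C i j (i+1) (j+1) p q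

def mbpStep (M : List (List Int)) (R C : Int) (r : List (List Int)) (c : Int × Int) : List (List Int) :=
  [(c.1, c.2 + 1), (c.1 + 1, c.2 - 1), (c.1 + 1, c.2), (c.1 + 1, c.2 + 1)].foldl (fun r xy =>
    if 0 ≤ xy.1 ∧ xy.1 < R ∧ 0 ≤ xy.2 ∧ xy.2 < C then
      let m := if mget M c.1 c.2 < mget M xy.1 xy.2 then mget M c.1 c.2 else mget M xy.1 xy.2
      sub2 (sub2 r c.1 c.2 m) xy.1 xy.2 m
    else r) r

def mbpCells (R C : Int) : List (Int × Int) :=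
  (PySem.List.pyRange 0 R 1).flatMap (fun i => (PySem.List.pyRange 0 C 1).map (fun j => (i, j)))

def nbrT (M : List (List Int)) (R C p q x y : Int) : Int :=
  if 0 ≤ x ∧ 0 ≤ y ∧ x < R ∧ y < C then min (mget M p q) (mget M x y) else 0

def nbrSum (M : List (List Int)) (R C p q : Int) : Int :=
  nbrT M R C p q (p-1) (q-1) + nbrT M R C p q (p-1) q + nbrT M R C p q (p-1) (q+1) +
  nbrT M R C p q p (q-1) + nbrT M R C p q p (q+1) +
  nbrT M R C p q (p+1) (q-1) + nbrT M R C p q (p+1) q + nbrT M R C p q (p+1) (q+1)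

theorem mget_eq_getElem {res : List (List Int)} {R C p q : Int} (hsh : mbpShape res R C)
    (hp : 0 ≤ p ∧ p < R) (hq : 0 ≤ q ∧ q < C) :
    ∃ hpl : p.toNat < res.length, ∃ hql : q.toNat < (res[p.toNat]'hpl).length,
      mget res p q = (res[p.toNat]'hpl)[q.toNat]'hql := by
  obtain ⟨hlen, hrow⟩ := hsh
  have hpl : p.toNat < res.length := by omega
  have hC : ((res[p.toNat]'hpl).length : Int) = C := hrow _ (List.getElem_mem hpl)
  have hql : q.toNat < (res[p.toNat]'hpl).length := by omega
  refine ⟨hpl, hql, ?_⟩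
  rw [mget, PySem.List.pyGetD_eq_getElem res [] hp.1 (by omega),
      PySem.List.pyGetD_eq_getElem _ 0 hq.1 (by omega)]

theorem shape_sub2 {res : List (List Int)} {R C x y m : Int} (hsh : mbpShape res R C)
    (hx : 0 ≤ x ∧ x < R) (hy : 0 ≤ y ∧ y < C) : mbpShape (sub2 res x y m) R C := by
  obtain ⟨hlen, hrow⟩ := hsh
  have hxl : x.toNat < res.length := by omega
  constructor
  · rw [sub2, PySem.List.pySetD_of_nonneg _ _ hx.1, List.length_set]; exact hlen
  · intro r hr
    rw [sub2, PySem.List.pySetD_of_nonneg _ _ hx.1] at hr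
    rcases List.mem_or_eq_of_mem_set hr with h | h
    · exact hrow _ h
    · subst h
      rw [PySem.List.pyGetD_eq_getElem res [] hx.1 (by omega),
          PySem.List.pySetD_of_nonneg _ _ hy.1, List.length_set]
      exact hrow _ (List.getElem_mem hxl)

theorem mget_sub2 {res : List (List Int)} {R C x y p q m : Int} (hsh : mbpShape res R C)
    (hx : 0 ≤ x ∧ x < R) (hy : 0 ≤ y ∧ y < C) (hp : 0 ≤ p ∧ p < R) (hq : 0 ≤ q ∧ q < C) :
    mget (sub2 res x y m) p q = if p = x ∧ q = y then mget res p q - m else mget res p q := by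
  obtain ⟨hlen, hrow⟩ := hsh
  have hxl : x.toNat < res.length := by omega
  obtain ⟨hpl, hql, hm⟩ := mget_eq_getElem (res := res) ⟨hlen, hrow⟩ hp hq
  obtain ⟨hxl', hyl, hmx⟩ := mget_eq_getElem (res := res) ⟨hlen, hrow⟩ hx hy
  obtain ⟨hpl2, hql2, hm2⟩ := mget_eq_getElem (shape_sub2 ⟨hlen, hrow⟩ hx hy) hp hq
  have hsub : sub2 res x y m = res.set x.toNat ((res[x.toNat]'hxl).set y.toNat (mget res x y - m)) := by
    rw [sub2, PySem.List.pySetD_of_nonneg _ _ hx.1,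
        PySem.List.pyGetD_eq_getElem res [] hx.1 (by omega),
        PySem.List.pySetD_of_nonneg _ _ hy.1]
  rw [hm2, hm]
  by_cases hpx : p = x
  · by_cases hqy : q = y
    · subst hpx; subst hqy
      rw [if_pos ⟨rfl, rfl⟩]
      simp only [hsub, List.getElem_set, hmx]
      simp
    · have hqy' : y.toNat ≠ q.toNat := by omega
      rw [if_neg (by tauto)]
      subst hpx
      simp [hsub, hqy']
  · have hne : x.toNat ≠ p.toNat := by omega
    rw [if_neg (by tauto)]
    simp [hsub, hne]

theorem shape_edge {R C : Int} {r : List (List Int)} {i j x y mm : Int}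
    (hsh : mbpShape r R C) (hi : 0 ≤ i ∧ i < R) (hj : 0 ≤ j ∧ j < C) :
    mbpShape (if 0 ≤ x ∧ x < R ∧ 0 ≤ y ∧ y < C then sub2 (sub2 r i j mm) x y mm else r) R C := by
  by_cases h : 0 ≤ x ∧ x < R ∧ 0 ≤ y ∧ y < C
  · rw [if_pos h]
    exact shape_sub2 (shape_sub2 hsh hi hj) ⟨h.1, h.2.1⟩ ⟨h.2.2.1, h.2.2.2⟩
  · rwa [if_neg h]

theorem mget_edge {M : List (List Int)} {R C : Int} {r : List (List Int)} {i j x y p q : Int}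
    (hsh : mbpShape r R C) (hi : 0 ≤ i ∧ i < R) (hj : 0 ≤ j ∧ j < C)
    (hp : 0 ≤ p ∧ p < R) (hq : 0 ≤ q ∧ q < C) :
    mget (if 0 ≤ x ∧ x < R ∧ 0 ≤ y ∧ y < C then
            sub2 (sub2 r i j (min (mget M i j) (mget M x y))) x y (min (mget M i j) (mget M x y))
          else r) p q
      = mget r p q - edgeC M R C i j x y p q := by
  by_cases h : 0 ≤ x ∧ x < R ∧ 0 ≤ y ∧ y < C
  · rw [if_pos h, edgeC, if_pos h,
      mget_sub2 (shape_sub2 hsh hi hj) ⟨h.1, h.2.1⟩ ⟨h.2.2.1, h.2.2.2⟩ hp hq,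
      mget_sub2 hsh hi hj hp hq]
    split_ifs <;> ring
  · rw [if_neg h, edgeC, if_neg h]; ring

theorem shape_mbpStep {M : List (List Int)} {R C : Int} {r : List (List Int)} {c : Int × Int}
    (hsh : mbpShape r R C) (hc : 0 ≤ c.1 ∧ c.1 < R ∧ 0 ≤ c.2 ∧ c.2 < C) :
    mbpShape (mbpStep M R C r c) R C := by
  obtain ⟨i, j⟩ := c
  obtain ⟨h1, h2, h3, h4⟩ := hc
  simp only [mbpStep, List.foldl_cons, List.foldl_nil]
  have hmin : ∀ u v : Int, (if u < v then u else v) = min u v := by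
    intro u v; split_ifs <;> omega
  simp only [hmin]
  exact shape_edge (shape_edge (shape_edge (shape_edge hsh ⟨h1,h2⟩ ⟨h3,h4⟩) ⟨h1,h2⟩ ⟨h3,h4⟩) ⟨h1,h2⟩ ⟨h3,h4⟩) ⟨h1,h2⟩ ⟨h3,h4⟩

theorem mget_mbpStep {M : List (List Int)} {R C : Int} {r : List (List Int)} {c : Int × Int}
    {p q : Int} (hsh : mbpShape r R C) (hc : 0 ≤ c.1 ∧ c.1 < R ∧ 0 ≤ c.2 ∧ c.2 < C)
    (hp : 0 ≤ p ∧ p < R) (hq : 0 ≤ q ∧ q < C) :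
    mget (mbpStep M R C r c) p q = mget r p q - contrib M R C c.1 c.2 p q := by
  obtain ⟨i, j⟩ := c
  obtain ⟨h1, h2, h3, h4⟩ := hc
  have hi : 0 ≤ i ∧ i < R := ⟨h1, h2⟩
  have hj : 0 ≤ j ∧ j < C := ⟨h3, h4⟩
  simp only [mbpStep, List.foldl_cons, List.foldl_nil]
  have hmin : ∀ u v : Int, (if u < v then u else v) = min u v := by
    intro u v; split_ifs <;> omega
  simp only [hmin]
  have s1 := shape_edge (x := i) (y := j+1) (mm := min (mget M i j) (mget M i (j+1))) hsh hi hj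
  have s2 := shape_edge (x := i+1) (y := j-1) (mm := min (mget M i j) (mget M (i+1) (j-1))) s1 hi hj
  have s3 := shape_edge (x := i+1) (y := j) (mm := min (mget M i j) (mget M (i+1) j)) s2 hi hj
  rw [mget_edge s3 hi hj hp hq, mget_edge s2 hi hj hp hq, mget_edge s1 hi hj hp hq,
      mget_edge hsh hi hj hp hq, contrib]
  ring

theorem mbp_sum_map_ite_point {α : Type} [DecidableEq α] (l : List α) (hnd : l.Nodup) (a : α) (f : α → Int) :
    (l.map (fun x => if x = a then f x else 0)).sum = if a ∈ l then f a else 0 := by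
  induction l with
  | nil => simp
  | cons x xs ih =>
    rcases List.nodup_cons.mp hnd with ⟨hx, hxs⟩
    by_cases hxa : x = a
    · subst hxa
      have h0 : (xs.map (fun y => if y = x then f y else 0)).sum = 0 := by
        apply List.sum_eq_zero
        intro z hz
        rcases List.mem_map.mp hz with ⟨y, hy, rfl⟩
        rw [if_neg]; rintro rfl; exact hx hy
      simp [h0]
    · have hne : (a ∈ x :: xs) ↔ (a ∈ xs) := by
        simp only [List.mem_cons]
        constructor
        · rintro (rfl | h)
          · exact (hxa rfl).elim
          · exact h
        · exact Or.inr
      simp only [List.map_cons, List.sum_cons, if_neg hxa, ih hxs, zero_add]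
      by_cases ham : a ∈ xs
      · rw [if_pos ham, if_pos (hne.mpr ham)]
      · rw [if_neg ham, if_neg (fun h => ham (hne.mp h))]

theorem mem_mbpCells {R C : Int} {c : Int × Int} :
    c ∈ mbpCells R C ↔ 0 ≤ c.1 ∧ c.1 < R ∧ 0 ≤ c.2 ∧ c.2 < C := by
  obtain ⟨p, q⟩ := c
  simp [mbpCells, List.mem_flatMap, List.mem_map, PySem.List.mem_pyRange_one]
  tauto

theorem nodup_mbpCells (R C : Int) : (mbpCells R C).Nodup := by
  have h : mbpCells R C = (PySem.List.pyRange 0 R 1) ×ˢ (PySem.List.pyRange 0 C 1) := rfl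
  rw [h]
  exact List.Nodup.product (PySem.List.nodup_pyRange_one _ _) (PySem.List.nodup_pyRange_one _ _)

theorem mget_fold_cells {M : List (List Int)} {R C : Int} (L : List (Int × Int))
    (hL : ∀ c ∈ L, 0 ≤ c.1 ∧ c.1 < R ∧ 0 ≤ c.2 ∧ c.2 < C)
    {r : List (List Int)} (hsh : mbpShape r R C) {p q : Int}
    (hp : 0 ≤ p ∧ p < R) (hq : 0 ≤ q ∧ q < C) :
    mget (L.foldl (mbpStep M R C) r) p q
      = mget r p q - (L.map (fun c => contrib M R C c.1 c.2 p q)).sum := by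
  induction L generalizing r with
  | nil => simp
  | cons c L ih =>
    have hc := hL c (List.mem_cons_self ..)
    rw [List.foldl_cons, List.map_cons, List.sum_cons,
        ih (fun d hd => hL d (List.mem_cons_of_mem _ hd)) (shape_mbpStep hsh hc),
        mget_mbpStep hsh hc hp hq]
    ring

theorem sum_edge {M : List (List Int)} {R C p q : Int} (dx dy : Int)
    (hp : 0 ≤ p ∧ p < R) (hq : 0 ≤ q ∧ q < C) :
    ((mbpCells R C).map (fun c => edgeC M R C c.1 c.2 (c.1 + dx) (c.2 + dy) p q)).sum
      = nbrT M R C p q (p + dx) (q + dy) + nbrT M R C p q (p - dx) (q - dy) := by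
  have hpt : ∀ c ∈ mbpCells R C,
      edgeC M R C c.1 c.2 (c.1 + dx) (c.2 + dy) p q
        = (if c = (p, q) then
             (if 0 ≤ c.1 + dx ∧ c.1 + dx < R ∧ 0 ≤ c.2 + dy ∧ c.2 + dy < C then
               min (mget M c.1 c.2) (mget M (c.1 + dx) (c.2 + dy)) else 0) else 0)
          + (if c = (p - dx, q - dy) then
             (if 0 ≤ c.1 + dx ∧ c.1 + dx < R ∧ 0 ≤ c.2 + dy ∧ c.2 + dy < C then
               min (mget M c.1 c.2) (mget M (c.1 + dx) (c.2 + dy)) else 0) else 0) := by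
    intro c _
    obtain ⟨i, j⟩ := c
    simp only [edgeC, Prod.mk.injEq]
    split_ifs <;> first | ring1 | (exfalso; omega)
  rw [List.map_congr_left hpt, PySem.List.sum_map_add_int,
      mbp_sum_map_ite_point _ (nodup_mbpCells R C) (p, q) _,
      mbp_sum_map_ite_point _ (nodup_mbpCells R C) (p - dx, q - dy) _]
  rw [if_pos (mem_mbpCells.mpr ⟨hp.1, hp.2, hq.1, hq.2⟩),
      show p - dx + dx = p from by ring, show q - dy + dy = q from by ring]
  by_cases hb : (p - dx, q - dy) ∈ mbpCells R C
  · rw [if_pos hb]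
    have hbm := mem_mbpCells.mp hb
    simp only at hbm
    rw [min_comm (mget M (p - dx) (q - dy)) (mget M p q), nbrT, nbrT]
    split_ifs <;> first | rfl | ring1 | (exfalso; omega)
  · rw [if_neg hb]
    have hbm : ¬(0 ≤ p - dx ∧ p - dx < R ∧ 0 ≤ q - dy ∧ q - dy < C) := by
      intro h; exact hb (mem_mbpCells.mpr h)
    rw [nbrT, nbrT]
    split_ifs <;> first | rfl | ring1 | (exfalso; omega)

theorem sum_contrib {M : List (List Int)} {R C p q : Int}
    (hp : 0 ≤ p ∧ p < R) (hq : 0 ≤ q ∧ q < C) :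
    ((mbpCells R C).map (fun c => contrib M R C c.1 c.2 p q)).sum = nbrSum M R C p q := by
  have h1 := sum_edge (M := M) (R := R) (C := C) 0 1 hp hq
  have h2 := sum_edge (M := M) (R := R) (C := C) 1 (-1) hp hq
  have h3 := sum_edge (M := M) (R := R) (C := C) 1 0 hp hq
  have h4 := sum_edge (M := M) (R := R) (C := C) 1 1 hp hq
  simp only [add_zero, sub_zero,
    show ∀ a : Int, a + -1 = a - 1 from fun a => by ring,
    show ∀ a : Int, a - -1 = a + 1 from fun a => by ring] at h1 h2 h3 h4
  simp only [contrib]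
  rw [PySem.List.sum_map_add_int, PySem.List.sum_map_add_int, PySem.List.sum_map_add_int,
      h1, h2, h3, h4, nbrSum]
  ring

theorem range3 (i : Int) : PySem.List.pyRange (i - 1) (i + 2) 1 = [i - 1, i, i + 1] := by
  rw [PySem.List.pyRange_one_cons (by omega), PySem.List.pyRange_one_cons (by omega),
      PySem.List.pyRange_one_cons (by omega), PySem.List.pyRange_one_eq_nil (by omega)]
  norm_num

theorem bombed_eq {M : List (List Int)} {R C i j : Int}
    (hi : 0 ≤ i ∧ i < R) (hj : 0 ≤ j ∧ j < C) :
    (PySem.List.pyRange (i - 1) (i + 2) 1).foldl (fun b x =>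
      (PySem.List.pyRange (j - 1) (j + 2) 1).foldl (fun b y =>
        if 0 ≤ x ∧ 0 ≤ y ∧ x < R ∧ y < C
        then b + min (mget M i j) (mget M x y) else b) b) 0
      = nbrSum M R C i j + mget M i j := by
  rw [range3, range3]
  simp only [List.foldl_cons, List.foldl_nil]
  simp only [show ∀ (c : Prop) (_ : Decidable c) (b t : Int),
      (if c then b + t else b) = b + (if c then t else 0) from fun c _ b t => by
    split_ifs <;> ring]
  rw [nbrSum]
  simp only [nbrT]
  rw [if_pos (show 0 ≤ i ∧ 0 ≤ j ∧ i < R ∧ j < C from ⟨hi.1, hj.1, hi.2, hj.2⟩), min_self]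
  ring

theorem mbp_sum_flatMap {α : Type} (l : List α) (f : α → List Int) :
    (l.flatMap f).sum = (l.map (fun a => (f a).sum)).sum := by
  induction l with
  | nil => rfl
  | cons x xs ih => simp [List.flatMap_cons, ih]

theorem flatMap_cells {γ : Type} (R C : Int) (f : Int → Int → γ) :
    ((PySem.List.pyRange 0 R 1).flatMap fun i => (PySem.List.pyRange 0 C 1).map fun j => f i j)
      = (mbpCells R C).map (fun c => f c.1 c.2) := by
  rw [mbpCells, List.map_flatMap]
  simp only [List.map_map]
  rfl

theorem dict_items_cells (R C : Int) (F : Int → Int → Int) :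
    (List.foldl (fun d i => List.foldl (fun d j => d.insert (i, j) (F i j)) d
        (PySem.List.pyRange 0 C 1)) PySem.Dict.empty (PySem.List.pyRange 0 R 1)).items
      = (mbpCells R C).map (fun c => ((c.1, c.2), F c.1 c.2)) := by
  have h : List.foldl (fun d c => d.insert (c.1, c.2) (F c.1 c.2)) PySem.Dict.empty (mbpCells R C)
      = List.foldl (fun d i => List.foldl (fun d j => d.insert (i, j) (F i j)) d
        (PySem.List.pyRange 0 C 1)) PySem.Dict.empty (PySem.List.pyRange 0 R 1) := by
    rw [mbpCells, List.foldl_flatMap]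
    simp only [List.foldl_map]
  rw [← h, PySem.Dict.items_foldl_insert_fresh (mbpCells R C) (fun c => (c.1, c.2))
        (fun c => F c.1 c.2) PySem.Dict.empty (fun a _ => rfl) ?hnd]
  · rfl
  case hnd =>
    have : (mbpCells R C).map (fun c => (c.1, c.2)) = mbpCells R C := by
      simp
    rw [this]
    exact nodup_mbpCells R C

theorem bfold_cells (M : List (List Int)) (R C : Int) (r0 : List (List Int)) :
    List.foldl (mbpStep M R C) r0 (mbpCells R C)
      = List.foldl (fun r i => List.foldl (fun r j =>
          List.foldl (fun r xy =>
            if 0 ≤ xy.1 ∧ xy.1 < R ∧ 0 ≤ xy.2 ∧ xy.2 < C then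
              sub2 (sub2 r i j (if mget M i j < mget M xy.1 xy.2 then mget M i j else mget M xy.1 xy.2))
                xy.1 xy.2 (if mget M i j < mget M xy.1 xy.2 then mget M i j else mget M xy.1 xy.2)
            else r) r [(i, j + 1), (i + 1, j - 1), (i + 1, j), (i + 1, j + 1)]) r
          (PySem.List.pyRange 0 C 1)) r0 (PySem.List.pyRange 0 R 1) := by
  rw [mbpCells, List.foldl_flatMap]
  simp only [List.foldl_map]
  rfl

theorem shape_res0 {R C : Int} (hR : 0 ≤ R) (hC : 0 ≤ C) (t : Int) :
    mbpShape (List.replicate R.toNat (List.replicate C.toNat t)) R C := by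
  constructor
  · simp [List.length_replicate]; omega
  · intro r hr
    rw [List.eq_of_mem_replicate hr]
    simp [List.length_replicate]; omega

theorem mget_res0 {R C p q : Int} (hR : 0 ≤ R) (hC : 0 ≤ C) (t : Int)
    (hp : 0 ≤ p ∧ p < R) (hq : 0 ≤ q ∧ q < C) :
    mget (List.replicate R.toNat (List.replicate C.toNat t)) p q = t := by
  obtain ⟨h1, h2, h3⟩ := mget_eq_getElem (shape_res0 hR hC t) hp hq
  rw [h3]
  simp [List.getElem_replicate]

theorem main (matrix : List (List Int)) :
    matrix_bombing_plan matrix = matrix_bombing_plan_alt matrix := by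
  simp only [matrix_bombing_plan, matrix_bombing_plan_alt]
  have hR : (0 : Int) ≤ (matrix.length : Int) := by positivity
  have hC : (0 : Int) ≤ ((PySem.List.pyGetD matrix 0 ([] : List Int)).length : Int) := by positivity
  set R : Int := (matrix.length : Int) with hRdef
  set C : Int := ((PySem.List.pyGetD matrix 0 ([] : List Int)).length : Int) with hCdef
  -- total
  have htot : List.foldl (fun s i => List.foldl (fun s j => s + mget matrix i j) s
      (PySem.List.pyRange 0 C 1)) 0 (PySem.List.pyRange 0 R 1)
      = ((PySem.List.pyRange 0 R 1).flatMap fun i =>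
          (PySem.List.pyRange 0 C 1).map fun j => mget matrix i j).sum := by
    simp only [PySem.List.foldl_add, mbp_sum_flatMap, zero_add]
  rw [htot]
  set T : Int := ((PySem.List.pyRange 0 R 1).flatMap fun i =>
      (PySem.List.pyRange 0 C 1).map fun j => mget matrix i j).sum with hTdef
  rw [dict_items_cells R C, ← bfold_cells matrix R C,
      flatMap_cells R C (fun i j => (i, j,
        mget (List.foldl (mbpStep matrix R C)
          (List.replicate R.toNat (List.replicate C.toNat T)) (mbpCells R C)) i j)),
      List.map_map]
  apply List.map_congr_left
  intro c hc
  obtain ⟨hc1, hc2, hc3, hc4⟩ := mem_mbpCells.mp hc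
  simp only [Function.comp]
  refine congrArg (fun z => (c.1, c.2, z)) ?_
  rw [bombed_eq ⟨hc1, hc2⟩ ⟨hc3, hc4⟩,
      mget_fold_cells (mbpCells R C) (fun d hd => mem_mbpCells.mp hd)
        (shape_res0 hR hC T) ⟨hc1, hc2⟩ ⟨hc3, hc4⟩,
      mget_res0 hR hC T ⟨hc1, hc2⟩ ⟨hc3, hc4⟩,
      sum_contrib ⟨hc1, hc2⟩ ⟨hc3, hc4⟩]
  ring

-- ===== VERDICT (by name: the statement is the Claim_ definition above) =====
theorem matrix_bombing_plan_spec : Claim_equal_matrix_bombing_plan := by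
  intro matrix _ _
  exact main matrix
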